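-- pv_equiv track=rewrite | github.com/Achilleasein/db_project | list.py | solution
-- ===== SOURCE A (Python) =====
-- def solution(S,X):
--     str_found = -1
--     chars_found = 0
--     if len(X) > len(S):
--         return str_found
--     str_size = len(X)
--     j = 0
--     for i in range(len(S)):
--         if len(X) + i > len(S):
--             return str_found
--         while j < str_size:
--             if X[i + j] == S[i + j]:
--                 chars_found += 1
--             elif X[i + j] == '*':
--                 chars_found += 1
--             else:
--                 chars_found -= 1
--             j += 1
--         if chars_found == str_size :
--             str_found = 1
--
--     return str_found
-- ===== SOURCE B (Python) =====
-- def solution(S, X):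
--     if len(X) > len(S):
--         return -1
--     return 1 if all(x == s or x == '*' for x, s in zip(X, S)) else -1
-- ===== Notes on version B (the rewrite author's own statement) =====
-- stated objective: faster
-- what changed: Replaces A's counter-based scan with manual index bookkeeping (a while loop that only ever runs once, plus a redundant outer for loop over all of S) by a single zip/all predicate over the paired characters after the length guard; B stops after |X| characters instead of iterating over all of S.
-- intended difference: On S='' and X='' A returns -1 because its for-loop body never runs and the initial -1 leaks out, while B returns 1: the empty pattern matches the empty string, which is the intended value (A itself returns 1 for empty X against any nonempty S). — e.g. on solution("", ""): A returns -1, B returns 1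
import Mathlib
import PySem

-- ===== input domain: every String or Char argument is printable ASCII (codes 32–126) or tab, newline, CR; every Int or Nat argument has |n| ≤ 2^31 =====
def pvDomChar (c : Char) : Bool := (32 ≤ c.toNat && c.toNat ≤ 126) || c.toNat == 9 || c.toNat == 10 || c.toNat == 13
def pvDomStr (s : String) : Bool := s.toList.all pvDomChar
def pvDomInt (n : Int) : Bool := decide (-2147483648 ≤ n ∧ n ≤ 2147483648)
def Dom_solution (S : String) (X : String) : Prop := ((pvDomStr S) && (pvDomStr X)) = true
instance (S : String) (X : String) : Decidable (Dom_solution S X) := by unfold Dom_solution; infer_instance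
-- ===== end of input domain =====

-- B replaces A's counter/while/for scan by a zip-all predicate; on ('','') A's -1 is an
-- accident of its loop never running and B returns the intended 1 (stated as D_ below).

-- ===== PORT A =====
-- character access: in every reachable state the index is in range, so getD is exact here
def pvChAt (l : List Char) (n : Nat) : Char := l.getD n ' '

-- the inner `while j < str_size` loop; returns (chars_found, j)
def pvWhile (Sl Xl : List Char) (strSize i : Nat) (j : Nat) (cf : Int) : Int × Nat :=
  if j < strSize then
    let cf' := if pvChAt Xl (i + j) == pvChAt Sl (i + j) then cf + 1
               else if pvChAt Xl (i + j) == '*' then cf + 1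
               else cf - 1
    pvWhile Sl Xl strSize i (j + 1) cf'
  else (cf, j)
termination_by strSize - j

-- the outer `for i in range(len(S))` loop with its early return
def pvLoop (Sl Xl : List Char) (strSize : Nat) (i : Nat) (strFound : Int) (cf : Int) (j : Nat) : Int :=
  if i < Sl.length then
    if strSize + i > Sl.length then strFound
    else
      let r := pvWhile Sl Xl strSize i j cf
      let sf := if r.1 = (strSize : Int) then 1 else strFound
      pvLoop Sl Xl strSize (i + 1) sf r.1 r.2
  else strFound
termination_by Sl.length - i

def solution (S : String) (X : String) : Int :=
  if X.toList.length > S.toList.length then -1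
  else pvLoop S.toList X.toList X.toList.length 0 (-1) 0 0

-- ===== PORT B =====
def solution_alt (S : String) (X : String) : Int :=
  if X.toList.length > S.toList.length then -1
  else if (X.toList.zip S.toList).all (fun p => p.1 == p.2 || p.1 == '*') then 1 else -1

-- ===== PRECONDITION & SPEC =====
-- On S = '' and X = '' A returns -1 (its for-loop body never runs, the initial -1 leaks out)
-- while B returns 1: the empty pattern matches the empty string, which is the intended value
-- (A itself returns 1 for empty X against any nonempty S).
def D_solution (S : String) (X : String) : Prop := S = "" ∧ X = ""
instance (S : String) (X : String) : Decidable (D_solution S X) := by unfold D_solution; infer_instance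

def Spec_solution (S : String) (X : String) (out : Int) : Prop := ¬ D_solution S X → out = solution_alt S X
instance (S : String) (X : String) (out : Int) : Decidable (Spec_solution S X out) := by unfold Spec_solution; infer_instance

def pvDiffWitness_solution : String × String := ("", "")
def pvDiffWitnessOut_solution : Int × Int := (-1, 1)

-- ===== CLAIM (what is proved, stated in full; the proofs are below) =====
def Claim_unchanged_solution : Prop := ∀ (S : String) (X : String), Dom_solution S X → Spec_solution S X (solution S X)
def Claim_changed_solution : Prop := Dom_solution (pvDiffWitness_solution.1) (pvDiffWitness_solution.2) ∧ D_solution (pvDiffWitness_solution.1) (pvDiffWitness_solution.2) ∧ solution (pvDiffWitness_solution.1) (pvDiffWitness_solution.2) = pvDiffWitnessOut_solution.1 ∧ solution_alt (pvDiffWitness_solution.1) (pvDiffWitness_solution.2) = pvDiffWitnessOut_solution.2 ∧ pvDiffWitnessOut_solution.1 ≠ pvDiffWitnessOut_solution.2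
def Claim_exact_solution : Prop := ∀ (S : String) (X : String), Dom_solution S X → D_solution S X → solution S X ≠ solution_alt S X

-- ===== LEMMAS AND PROOFS =====

-- a position matches iff the character equals or the pattern char is '*'
def pvGood (Sl Xl : List Char) (t : Nat) : Bool :=
  pvChAt Xl t == pvChAt Sl t || pvChAt Xl t == '*'

-- inner while loop from (j, cf) with i = 0: final j is strSize, final cf is bounded by
-- cf + (m - j) with equality exactly when every remaining position matches
theorem pvWhile_spec (Sl Xl : List Char) (m : Nat) :
    ∀ k j cf, j + k = m →
      (pvWhile Sl Xl m 0 j cf).2 = m ∧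
      (pvWhile Sl Xl m 0 j cf).1 ≤ cf + k ∧
      ((pvWhile Sl Xl m 0 j cf).1 = cf + k ↔ ∀ t, j ≤ t → t < m → pvGood Sl Xl t = true) := by
  intro k
  induction k with
  | zero =>
    intro j cf h
    rw [pvWhile]
    simp only [show ¬ j < m by omega, if_false]
    refine ⟨by omega, by simp, ?_⟩
    constructor
    · intro _ t ht1 ht2; omega
    · intro _; omega
  | succ k ih =>
    intro j cf h
    rw [pvWhile]
    simp only [show j < m by omega, if_true]
    have hz : 0 + j = j := by omega
    by_cases hg : pvGood Sl Xl j = true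
    · have hcf' : (if pvChAt Xl (0 + j) == pvChAt Sl (0 + j) then cf + 1
               else if pvChAt Xl (0 + j) == '*' then cf + 1 else cf - 1) = cf + 1 := by
        rw [hz]
        unfold pvGood at hg
        rcases Bool.or_eq_true_iff.1 hg with h1 | h1 <;> simp [h1]
      rw [hcf']
      obtain ⟨hj, hb, hiff⟩ := ih (j + 1) (cf + 1) (by omega)
      refine ⟨hj, by omega, ?_⟩
      have : cf + 1 + (k : Int) = cf + (k + 1 : Nat) := by push_cast; ring
      rw [← this, hiff]
      constructor
      · intro hall t ht1 ht2
        rcases Nat.eq_or_lt_of_le ht1 with rfl | hlt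
        · exact hg
        · exact hall t hlt ht2
      · intro hall t ht1 ht2; exact hall t (by omega) ht2
    · have hcf' : (if pvChAt Xl (0 + j) == pvChAt Sl (0 + j) then cf + 1
               else if pvChAt Xl (0 + j) == '*' then cf + 1 else cf - 1) = cf - 1 := by
        rw [hz]
        unfold pvGood at hg
        simp only [Bool.or_eq_true_iff, not_or, Bool.not_eq_true] at hg
        simp [hg.1, hg.2]
      rw [hcf']
      obtain ⟨hj, hb, hiff⟩ := ih (j + 1) (cf - 1) (by omega)
      refine ⟨hj, by push_cast; omega, ?_⟩
      constructor
      · intro heq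
        exfalso
        push_cast at heq hb
        omega
      · intro hall
        exact absurd (hall j (le_refl _) (by omega)) hg

-- once j = strSize the while loop is a no-op, so the outer loop just returns strFound,
-- provided strFound is already 1 whenever cf = strSize
theorem pvLoop_tail (Sl Xl : List Char) (m : Nat) :
    ∀ k i sf cf, Sl.length ≤ i + k → (cf = (m : Int) → sf = 1) →
      pvLoop Sl Xl m i sf cf m = sf := by
  intro k
  induction k with
  | zero =>
    intro i sf cf hk _
    rw [pvLoop]
    simp only [show ¬ i < Sl.length by omega, if_false]
  | succ k ih =>
    intro i sf cf hk hcf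
    rw [pvLoop]
    by_cases hi : i < Sl.length
    · simp only [hi, if_true]
      by_cases hg : m + i > Sl.length
      · simp only [hg, if_true]
      · simp only [hg, if_false]
        have hw : pvWhile Sl Xl m i m cf = (cf, m) := by
          rw [pvWhile]; simp
        rw [hw]
        have hsf : (if cf = (m : Int) then (1 : Int) else sf) = sf := by
          by_cases hc : cf = (m : Int)
          · simp [hc, hcf hc]
          · simp [hc]
        simp only [hsf]
        exact ih (i + 1) sf cf (by omega) hcf
    · simp only [hi, if_false]

-- B's all-over-zip equals the per-index pvGood condition when the pattern fits
theorem zip_all_iff (Sl Xl : List Char) (h : Xl.length ≤ Sl.length) :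
    ((Xl.zip Sl).all (fun p => p.1 == p.2 || p.1 == '*') = true) ↔
      ∀ t, t < Xl.length → pvGood Sl Xl t = true := by
  rw [List.all_eq_true]
  constructor
  · intro hall t ht
    have hlen : t < (Xl.zip Sl).length := by simp [List.length_zip]; omega
    have hmem : (Xl[t]'ht, Sl[t]'(by omega)) ∈ Xl.zip Sl := by
      have := List.getElem_zip (l := Xl) (l' := Sl) (i := t) (h := hlen)
      rw [← this]; exact List.getElem_mem hlen
    have := hall _ hmem
    unfold pvGood pvChAt
    rw [List.getD_eq_getElem _ _ ht, List.getD_eq_getElem _ _ (by omega : t < Sl.length)]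
    exact this
  · intro hall p hp
    obtain ⟨t, hlen, hget⟩ := List.mem_iff_getElem.1 hp
    have htX : t < Xl.length := by simp [List.length_zip] at hlen; omega
    have htS : t < Sl.length := by omega
    have := hall t htX
    unfold pvGood pvChAt at this
    rw [List.getD_eq_getElem _ _ htX, List.getD_eq_getElem _ _ htS] at this
    rw [← hget, List.getElem_zip]
    exact this

theorem toList_len_zero (s : String) (h : s.toList.length = 0) : s = "" := by
  have h0 : s.toList = [] := List.length_eq_zero_iff.mp h
  have : s.toList = ("" : String).toList := by simp [h0]
  exact String.toList_inj.mp this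

theorem solution_eq_alt (S X : String) (hD : ¬ D_solution S X) :
    solution S X = solution_alt S X := by
  unfold solution solution_alt
  by_cases hlen : X.toList.length > S.toList.length
  · rw [if_pos hlen, if_pos hlen]
  · simp only [hlen, if_false]
    push_neg at hlen
    by_cases hS : S.toList.length = 0
    · exfalso
      apply hD
      have hX : X.toList.length = 0 := by omega
      exact ⟨toList_len_zero S hS, toList_len_zero X hX⟩
    · -- first iteration: i = 0 passes the guard, runs the while loop over all of X
      rw [pvLoop]
      simp only [show 0 < S.toList.length by omega, if_true,
        show ¬ X.toList.length + 0 > S.toList.length by omega, if_false]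
      obtain ⟨hj, _, hiff⟩ := pvWhile_spec S.toList X.toList X.toList.length X.toList.length 0 0 (by omega)
      set r := pvWhile S.toList X.toList X.toList.length 0 0 0 with hr
      rw [hj]
      have htail := pvLoop_tail S.toList X.toList X.toList.length S.toList.length 1
        (if r.1 = (X.toList.length : Int) then 1 else -1) r.1 (by omega)
        (by intro hc; simp [hc])
      rw [htail]
      by_cases hall : ∀ t, t < X.toList.length → pvGood S.toList X.toList t = true
      · have hz : ∀ t, 0 ≤ t → t < X.toList.length → pvGood S.toList X.toList t = true := by
          intro t _ ht; exact hall t ht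
        have h1 : r.1 = ((0 : Int) + X.toList.length) := hiff.2 hz
        rw [(zip_all_iff S.toList X.toList hlen).2 hall]
        simp only [if_true]
        rw [h1]; simp
      · have h2 : ¬ ((X.toList.zip S.toList).all (fun p => p.1 == p.2 || p.1 == '*') = true) := by
          intro hc
          exact hall ((zip_all_iff S.toList X.toList hlen).1 hc)
        simp only [h2]
        have h1 : ¬ r.1 = ((0 : Int) + X.toList.length) := by
          intro hc
          exact hall (fun t ht => hiff.1 hc t (by omega) ht)
        simp only [zero_add] at h1
        rw [if_neg h1]
        simp

-- ===== VERDICT (by name: the statement is the Claim_ definition above) =====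
theorem solution_spec : Claim_unchanged_solution := by
  intro S X _ hD
  exact solution_eq_alt S X hD

-- the witness values themselves (pvLoop is well-founded recursion, so `decide` cannot unfold it)
theorem sol_empty : solution "" "" = -1 := by
  unfold solution
  rw [if_neg (by decide)]
  rw [pvLoop]
  simp

theorem solution_changed : Claim_changed_solution := by
  unfold Claim_changed_solution
  refine ⟨by decide, by decide, sol_empty, by decide, by decide⟩

theorem solution_tight : Claim_exact_solution := by
  intro S X _ hD
  obtain ⟨rfl, rfl⟩ := hD
  rw [sol_empty, show solution_alt "" "" = 1 from by decide]
  decide
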